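-- pv_equiv track=rewrite | github.com/pypi-data/pypi-mirror-399 | packages/relayx-py/relayx_py-1.1.0-py3-none-any.whl/relayx_py/queue.py | __topic_pattern_matcher
-- ===== SOURCE A (Python) =====
-- def __topic_pattern_matcher(pattern_a, pattern_b):
--     """
--     Return True when two NATS-style subject patterns could match
--     the same concrete subject.
--
--     Rules
--     -----
--     · Literal tokens must be equal.
--     · '*'  ⇒ exactly one token (either side).
--     · '>'  ⇒ one‑or‑more tokens AND must be the final token in its pattern.
--     · '$'  never allowed (assume caller already validated with is_valid_subject).
--
--     The algorithm walks both token lists with pointers and back‑tracks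
--     when it finds a '>' that can absorb additional tokens.
--     """
--     a = pattern_a.split(".")
--     b = pattern_b.split(".")
--     i = j = 0                       # cursors
--     star_a_j = star_b_j = -1        # next positions to try when back‑tracking
--
--     while i < len(a) or j < len(b):
--         tok_a = a[i] if i < len(a) else None
--         tok_b = b[j] if j < len(b) else None
--
--         # Handle '>' in pattern‑A (check before wildcard matching)
--         if tok_a == ">":
--             if i != len(a) - 1 or j >= len(b):      # must be final & eat ≥1 token
--                 return False
--             i += 1               # step past '>'
--             j += 1               # consume first token in B
--             star_a_j = j         # remember where to start back‑tracking
--             continue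
--
--         # Handle '>' in pattern‑B (check before wildcard matching)
--         if tok_b == ">":
--             if j != len(b) - 1 or i >= len(a):
--                 return False
--             j += 1
--             i += 1
--             star_b_j = i
--             continue
--
--         # Literal match or single‑token wildcard on either side
--         single = (tok_a == "*" and j < len(b)) or (tok_b == "*" and i < len(a))
--         if (tok_a is not None and tok_a == tok_b) or single:
--             i += 1
--             j += 1
--             continue
--
--         # Back‑track using the most recent '>' in A
--         if star_a_j != -1 and star_a_j <= len(b):
--             j = star_a_j
--             star_a_j += 1        # make A's '>' absorb one more B‑token
--             continue
--
--         # Back‑track using the most recent '>' in B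
--         if star_b_j != -1 and star_b_j <= len(a):
--             i = star_b_j
--             star_b_j += 1        # make B's '>' absorb one more A‑token
--             continue
--
--         return False             # dead‑end
--
--     return True
-- ===== SOURCE B (Python) =====
-- def __topic_pattern_matcher(pattern_a, pattern_b):
--     """Token-structure check: compare core prefixes and lengths directly
--     instead of walking with cursors and back-tracking."""
--     a = pattern_a.split(".")
--     b = pattern_b.split(".")
--     # malformed patterns ('>' not in final position) can never overlap
--     if ">" in a[:-1] or ">" in b[:-1]:
--         return False
--     open_a = a[-1] == ">"
--     open_b = b[-1] == ">"
--     core_a = a[:-1] if open_a else a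
--     core_b = b[:-1] if open_b else b
--     if open_a and open_b:
--         ok = True
--     elif open_a:
--         ok = len(core_b) >= len(core_a) + 1
--     elif open_b:
--         ok = len(core_a) >= len(core_b) + 1
--     else:
--         ok = len(core_a) == len(core_b)
--     if not ok:
--         return False
--     return all(x == y or x == "*" or y == "*" for x, y in zip(core_a, core_b))
-- ===== Notes on version B (the rewrite author's own statement) =====
-- stated objective: simpler
-- what changed: Replaced the two-cursor backtracking walk over both token lists with a direct structural check: strip a trailing '>', compare core lengths by a closed-form rule per open/fixed combination, and test pairwise prefix compatibility in one zip pass.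
-- intended difference: When both valid patterns end in '>', their token counts differ and their common core prefix is compatible (e.g. '>' vs 'a.>'), A returns False although such patterns can match the same subject, while B returns the intended True. — e.g. on __topic_pattern_matcher(">", "a.>"): A returns false, B returns true
-- outside the precondition, e.g. on __topic_pattern_matcher('>', '>.a'): A returns True, B returns False; on __topic_pattern_matcher('a.>', 'a.>.b'): A returns True, B returns False
import Mathlib
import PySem

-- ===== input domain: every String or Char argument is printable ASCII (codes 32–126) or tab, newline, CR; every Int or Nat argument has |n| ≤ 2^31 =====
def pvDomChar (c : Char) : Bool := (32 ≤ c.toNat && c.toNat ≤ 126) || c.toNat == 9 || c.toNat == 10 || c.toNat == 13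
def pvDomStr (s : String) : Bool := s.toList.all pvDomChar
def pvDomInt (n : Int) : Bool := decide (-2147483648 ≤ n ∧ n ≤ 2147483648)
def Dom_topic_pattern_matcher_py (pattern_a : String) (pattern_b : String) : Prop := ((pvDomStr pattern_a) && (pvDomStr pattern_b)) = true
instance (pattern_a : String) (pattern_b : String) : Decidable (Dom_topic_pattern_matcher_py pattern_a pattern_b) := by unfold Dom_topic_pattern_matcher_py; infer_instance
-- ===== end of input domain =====

-- B replaces A's two-cursor backtracking walk by a direct structural check (strip trailing '>',
-- closed-form length rule, one zip pass over the cores); objective: simpler. Return values only; no mutation.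

-- ===== PORT A =====
-- The while-loop of A, transliterated with a fuel parameter for totality (the fuel the port
-- passes is proved sufficient on all Pre_ inputs in the lemmas below; cursors i, j are Nat —
-- in A they start at 0 and are only ever set to 0-based positions — the stars are Int with
-- Python's -1 sentinel).
def aLoop (a b : List String) : Nat → Nat → Nat → Int → Int → Bool
  | 0, _, _, _, _ => false
  | fuel+1, i, j, saj, sbj =>
    if i < a.length ∨ j < b.length then
      -- tok_a = a[i] if i < len(a) else None ; same for tok_b
      let tokA := a[i]?
      let tokB := b[j]?
      if tokA = some ">" then
        (if (i : Int) ≠ (a.length : Int) - 1 ∨ j ≥ b.length then false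
         else aLoop a b fuel (i+1) (j+1) ((j : Int) + 1) sbj)
      else if tokB = some ">" then
        (if (j : Int) ≠ (b.length : Int) - 1 ∨ i ≥ a.length then false
         else aLoop a b fuel (i+1) (j+1) saj ((i : Int) + 1))
      else if (tokA.isSome ∧ tokA = tokB) ∨ ((tokA = some "*" ∧ j < b.length) ∨ (tokB = some "*" ∧ i < a.length)) then
        aLoop a b fuel (i+1) (j+1) saj sbj
      else if saj ≠ -1 ∧ saj ≤ (b.length : Int) then
        aLoop a b fuel i saj.toNat (saj + 1) sbj
      else if sbj ≠ -1 ∧ sbj ≤ (a.length : Int) then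
        aLoop a b fuel sbj.toNat j saj (sbj + 1)
      else false
    else true

-- pattern.split(".") — '.' is a fixed nonempty separator, so Python's str.split(sep) is Chars.splitOn
def pvTokens (s : String) : List String := (PySem.Chars.splitOn s.toList ['.']).map (fun cs => String.ofList cs)

def topic_pattern_matcher_py (pattern_a : String) (pattern_b : String) : Bool :=
  let a := pvTokens pattern_a
  let b := pvTokens pattern_b
  aLoop a b (3 * (a.length + b.length) + 6) 0 0 (-1) (-1)

-- ===== PORT B =====
def topic_pattern_matcher_py_alt (pattern_a : String) (pattern_b : String) : Bool :=
  let a := pvTokens pattern_a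
  let b := pvTokens pattern_b
  if a.dropLast.contains ">" || b.dropLast.contains ">" then false
  else
    let oa := a.getLast? == some ">"
    let ob := b.getLast? == some ">"
    let ca := if oa then a.dropLast else a
    let cb := if ob then b.dropLast else b
    let ok := if oa then (if ob then true else decide (cb.length ≥ ca.length + 1))
              else if ob then decide (ca.length ≥ cb.length + 1)
              else decide (ca.length = cb.length)
    ok && (ca.zip cb).all (fun p => p.1 == p.2 || p.1 == "*" || p.2 == "*")

-- ===== PRECONDITION & SPEC =====
-- Pre_ excludes malformed patterns that have a '>' token before the final position: A's docstring
-- assumes the caller already validated the subjects, and A's accept/reject on such patterns is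
-- accidental (e.g. it returns True on ('>', '>.a'), where B returns False); B rejects them all.
def Pre_topic_pattern_matcher_py (pattern_a : String) (pattern_b : String) : Prop :=
  ">" ∉ (pvTokens pattern_a).dropLast ∧ ">" ∉ (pvTokens pattern_b).dropLast
instance (pattern_a : String) (pattern_b : String) : Decidable (Pre_topic_pattern_matcher_py pattern_a pattern_b) := by
  unfold Pre_topic_pattern_matcher_py; infer_instance

def pvWitness_topic_pattern_matcher_py : String × String := ("a.b.c", "a.*.c")

-- When both (valid) patterns end in '>', their token counts differ and their common core prefix is
-- compatible (e.g. '>' vs 'a.>'), A returns False although the patterns can match the same concrete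
-- subject, while B returns the intended True.
def D_topic_pattern_matcher_py (pattern_a : String) (pattern_b : String) : Prop :=
  (pvTokens pattern_a).getLast? = some ">" ∧
  (pvTokens pattern_b).getLast? = some ">" ∧
  (pvTokens pattern_a).length ≠ (pvTokens pattern_b).length ∧
  ∀ q ∈ (pvTokens pattern_a).dropLast.zip (pvTokens pattern_b).dropLast,
    q.1 = q.2 ∨ q.1 = "*" ∨ q.2 = "*"
instance (pattern_a : String) (pattern_b : String) : Decidable (D_topic_pattern_matcher_py pattern_a pattern_b) := by
  unfold D_topic_pattern_matcher_py; infer_instance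

def Spec_topic_pattern_matcher_py (pattern_a : String) (pattern_b : String) (out : Bool) : Prop :=
  ¬ D_topic_pattern_matcher_py pattern_a pattern_b → out = topic_pattern_matcher_py_alt pattern_a pattern_b
instance (pattern_a : String) (pattern_b : String) (out : Bool) : Decidable (Spec_topic_pattern_matcher_py pattern_a pattern_b out) := by
  unfold Spec_topic_pattern_matcher_py; infer_instance

def pvDiffWitness_topic_pattern_matcher_py : String × String := (">", "a.>")
def pvDiffWitnessOut_topic_pattern_matcher_py : Bool × Bool := (false, true)

-- ===== CLAIM =====
def Claim_unchanged_topic_pattern_matcher_py : Prop := ∀ (pattern_a : String) (pattern_b : String), Dom_topic_pattern_matcher_py pattern_a pattern_b → Pre_topic_pattern_matcher_py pattern_a pattern_b → Spec_topic_pattern_matcher_py pattern_a pattern_b (topic_pattern_matcher_py pattern_a pattern_b)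
def Claim_changed_topic_pattern_matcher_py : Prop := Dom_topic_pattern_matcher_py (pvDiffWitness_topic_pattern_matcher_py.1) (pvDiffWitness_topic_pattern_matcher_py.2) ∧ Pre_topic_pattern_matcher_py (pvDiffWitness_topic_pattern_matcher_py.1) (pvDiffWitness_topic_pattern_matcher_py.2) ∧ D_topic_pattern_matcher_py (pvDiffWitness_topic_pattern_matcher_py.1) (pvDiffWitness_topic_pattern_matcher_py.2) ∧ topic_pattern_matcher_py (pvDiffWitness_topic_pattern_matcher_py.1) (pvDiffWitness_topic_pattern_matcher_py.2) = pvDiffWitnessOut_topic_pattern_matcher_py.1 ∧ topic_pattern_matcher_py_alt (pvDiffWitness_topic_pattern_matcher_py.1) (pvDiffWitness_topic_pattern_matcher_py.2) = pvDiffWitnessOut_topic_pattern_matcher_py.2 ∧ pvDiffWitnessOut_topic_pattern_matcher_py.1 ≠ pvDiffWitnessOut_topic_pattern_matcher_py.2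
def Claim_exact_topic_pattern_matcher_py : Prop := ∀ (pattern_a : String) (pattern_b : String), Dom_topic_pattern_matcher_py pattern_a pattern_b → Pre_topic_pattern_matcher_py pattern_a pattern_b → D_topic_pattern_matcher_py pattern_a pattern_b → topic_pattern_matcher_py pattern_a pattern_b ≠ topic_pattern_matcher_py_alt pattern_a pattern_b

-- ===== LEMMAS AND PROOFS =====

-- 'pattern is open': its last token is '>'
def pvOa (a : List String) : Prop := a.getLast? = some ">"
-- length of the shorter core (tokens before a trailing '>')
def pvN (a b : List String) : Nat :=
  min (a.length - (if a.getLast? = some ">" then 1 else 0)) (b.length - (if b.getLast? = some ">" then 1 else 0))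
def pvCompat (x y : String) : Prop := x = y ∨ x = "*" ∨ y = "*"
-- the length condition A's walk enforces (note: equal lengths when BOTH are open)
def pvELen (a b : List String) : Prop :=
  if a.getLast? = some ">" then (if b.getLast? = some ">" then a.length = b.length else a.length ≤ b.length)
  else (if b.getLast? = some ">" then b.length ≤ a.length else a.length = b.length)

lemma aLoop_succ (a b : List String) (fuel i j : Nat) (saj sbj : Int) :
    aLoop a b (fuel+1) i j saj sbj =
    if i < a.length ∨ j < b.length then
      let tokA := a[i]?
      let tokB := b[j]?
      if tokA = some ">" then
        (if (i : Int) ≠ (a.length : Int) - 1 ∨ j ≥ b.length then false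
         else aLoop a b fuel (i+1) (j+1) ((j : Int) + 1) sbj)
      else if tokB = some ">" then
        (if (j : Int) ≠ (b.length : Int) - 1 ∨ i ≥ a.length then false
         else aLoop a b fuel (i+1) (j+1) saj ((i : Int) + 1))
      else if (tokA.isSome ∧ tokA = tokB) ∨ ((tokA = some "*" ∧ j < b.length) ∨ (tokB = some "*" ∧ i < a.length)) then
        aLoop a b fuel (i+1) (j+1) saj sbj
      else if saj ≠ -1 ∧ saj ≤ (b.length : Int) then
        aLoop a b fuel i saj.toNat (saj + 1) sbj
      else if sbj ≠ -1 ∧ sbj ≤ (a.length : Int) then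
        aLoop a b fuel sbj.toNat j saj (sbj + 1)
      else false
    else true := rfl


-- branch-resolved unfoldings of one loop iteration
lemma aLoop_exit (a b : List String) (fuel i j : Nat) (saj sbj : Int)
    (h0 : ¬ (i < a.length ∨ j < b.length)) :
    aLoop a b (fuel+1) i j saj sbj = true := by
  rw [aLoop_succ, if_neg h0]

lemma aLoop_gtA (a b : List String) (fuel i j : Nat) (saj sbj : Int)
    (h0 : i < a.length ∨ j < b.length) (h1 : a[i]? = some ">") :
    aLoop a b (fuel+1) i j saj sbj =
      if (i : Int) ≠ (a.length : Int) - 1 ∨ j ≥ b.length then false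
      else aLoop a b fuel (i+1) (j+1) ((j : Int) + 1) sbj := by
  rw [aLoop_succ, if_pos h0]; simp only [h1, reduceIte]

lemma aLoop_gtB (a b : List String) (fuel i j : Nat) (saj sbj : Int)
    (h0 : i < a.length ∨ j < b.length) (h1 : a[i]? ≠ some ">") (h2 : b[j]? = some ">") :
    aLoop a b (fuel+1) i j saj sbj =
      if (j : Int) ≠ (b.length : Int) - 1 ∨ i ≥ a.length then false
      else aLoop a b fuel (i+1) (j+1) saj ((i : Int) + 1) := by
  rw [aLoop_succ, if_pos h0]; simp only [h2, reduceIte, if_neg h1]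

lemma aLoop_match (a b : List String) (fuel i j : Nat) (saj sbj : Int)
    (h0 : i < a.length ∨ j < b.length) (h1 : a[i]? ≠ some ">") (h2 : b[j]? ≠ some ">")
    (h3 : (a[i]?.isSome ∧ a[i]? = b[j]?) ∨ ((a[i]? = some "*" ∧ j < b.length) ∨ (b[j]? = some "*" ∧ i < a.length))) :
    aLoop a b (fuel+1) i j saj sbj = aLoop a b fuel (i+1) (j+1) saj sbj := by
  rw [aLoop_succ, if_pos h0]; simp only [if_neg h1, if_neg h2, if_pos h3]

lemma aLoop_btA (a b : List String) (fuel i j : Nat) (saj sbj : Int)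
    (h0 : i < a.length ∨ j < b.length) (h1 : a[i]? ≠ some ">") (h2 : b[j]? ≠ some ">")
    (h3 : ¬ ((a[i]?.isSome ∧ a[i]? = b[j]?) ∨ ((a[i]? = some "*" ∧ j < b.length) ∨ (b[j]? = some "*" ∧ i < a.length))))
    (h4 : saj ≠ -1 ∧ saj ≤ (b.length : Int)) :
    aLoop a b (fuel+1) i j saj sbj = aLoop a b fuel i saj.toNat (saj + 1) sbj := by
  rw [aLoop_succ, if_pos h0]; simp only [if_neg h1, if_neg h2, if_neg h3, if_pos h4]

lemma aLoop_btB (a b : List String) (fuel i j : Nat) (saj sbj : Int)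
    (h0 : i < a.length ∨ j < b.length) (h1 : a[i]? ≠ some ">") (h2 : b[j]? ≠ some ">")
    (h3 : ¬ ((a[i]?.isSome ∧ a[i]? = b[j]?) ∨ ((a[i]? = some "*" ∧ j < b.length) ∨ (b[j]? = some "*" ∧ i < a.length))))
    (h4 : ¬ (saj ≠ -1 ∧ saj ≤ (b.length : Int)))
    (h5 : sbj ≠ -1 ∧ sbj ≤ (a.length : Int)) :
    aLoop a b (fuel+1) i j saj sbj = aLoop a b fuel sbj.toNat j saj (sbj + 1) := by
  rw [aLoop_succ, if_pos h0]; simp only [if_neg h1, if_neg h2, if_neg h3, if_neg h4, if_pos h5]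

lemma aLoop_dead (a b : List String) (fuel i j : Nat) (saj sbj : Int)
    (h0 : i < a.length ∨ j < b.length) (h1 : a[i]? ≠ some ">") (h2 : b[j]? ≠ some ">")
    (h3 : ¬ ((a[i]?.isSome ∧ a[i]? = b[j]?) ∨ ((a[i]? = some "*" ∧ j < b.length) ∨ (b[j]? = some "*" ∧ i < a.length))))
    (h4 : ¬ (saj ≠ -1 ∧ saj ≤ (b.length : Int)))
    (h5 : ¬ (sbj ≠ -1 ∧ sbj ≤ (a.length : Int))) :
    aLoop a b (fuel+1) i j saj sbj = false := by
  rw [aLoop_succ, if_pos h0]; simp only [if_neg h1, if_neg h2, if_neg h3, if_neg h4, if_neg h5]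

-- a valid pattern has no '>' strictly before its last token
lemma pvValid_getD (a : List String) (hv : ">" ∉ a.dropLast) (p : Nat) (hp : p < a.length - 1) :
    a.getD p "" ≠ ">" := by
  intro h
  have hp' : p < a.dropLast.length := by simp [List.length_dropLast]; omega
  have hmem : a.dropLast[p] ∈ a.dropLast := List.getElem_mem _
  rw [List.getElem_dropLast] at hmem
  have hlen : p < a.length := by omega
  rw [List.getD_eq_getElem a "" hlen] at h
  rw [h] at hmem
  exact hv hmem

lemma pvOa_getD (a : List String) (ha : a ≠ []) :
    pvOa a ↔ a.getD (a.length - 1) "" = ">" := by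
  have hlen : 0 < a.length := List.length_pos_iff.2 ha
  have h1 : a.length - 1 < a.length := by omega
  rw [pvOa, List.getLast?_eq_getElem?, List.getElem?_eq_getElem h1,
    List.getD_eq_getElem a "" h1]
  simp


-- a token strictly inside the core of a valid pattern is not '>'
lemma pvTok_ne (a : List String) (hv : ">" ∉ a.dropLast) (i : Nat)
    (hi : i < a.length - (if a.getLast? = some ">" then 1 else 0)) : a.getD i "" ≠ ">" := by
  by_cases hlast : i = a.length - 1
  · have ha0 : a ≠ [] := by
      intro h; subst h; simp at hi
    split at hi
    · omega
    · rename_i goa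
      rw [hlast]
      intro h
      exact goa ((pvOa_getD a ha0).2 h)
  · exact pvValid_getD a hv i (by split at hi <;> omega)

-- the walk after A's '>' has been consumed: i = len(a), star_a_j drives j forward
lemma pvWalkA (a b : List String) (hb : ">" ∉ b.dropLast) :
    ∀ (fuel j : Nat) (s : Int), (s = (j : Int) ∨ s = (j : Int) + 1) → j ≤ b.length →
    2 * b.length + 4 ≤ fuel + j + s.toNat →
    (aLoop a b fuel a.length j s (-1) = true ↔ (¬ pvOa b ∨ j = b.length)) := by
  intro fuel
  induction fuel with
  | zero =>
    intro j s hs hj hfuel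
    exfalso
    rcases hs with rfl | rfl <;> simp at hfuel <;> omega
  | succ fuel ih =>
    intro j s hs hj hfuel
    by_cases hjl : j = b.length
    · subst hjl
      rw [aLoop_exit a b fuel a.length b.length s (-1) (by omega)]
      simp
    · have hjlt : j < b.length := by omega
      have hb0 : b ≠ [] := by intro h; subst h; simp at hjlt
      have h0 : a.length < a.length ∨ j < b.length := Or.inr hjlt
      have htokA : a[a.length]? = none := by simp
      have h1 : a[a.length]? ≠ some ">" := by simp [htokA]
      have htokB : b[j]? = some (b.getD j "") := by
        rw [List.getD_eq_getElem b "" hjlt, List.getElem?_eq_getElem hjlt]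
      by_cases hbj : b.getD j "" = ">"
      · -- b's '>' reached: i ≥ len(a) so A returns False; and pvOa b holds
        have h2 : b[j]? = some ">" := by rw [htokB, hbj]
        rw [aLoop_gtB a b fuel a.length j s (-1) h0 h1 h2,
          if_pos (Or.inr (le_refl a.length))]
        have hjlast : j = b.length - 1 := by
          by_contra hne
          exact pvValid_getD b hb j (by omega) hbj
        simp only [Bool.false_eq_true, false_iff]
        push_neg
        refine ⟨?_, hjl⟩
        rw [pvOa_getD b hb0, ← hjlast]
        exact hbj
      · -- literal token: match fails, back-track on star_a_j
        have h2 : b[j]? ≠ some ">" := by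
          rw [htokB]; exact fun hcon => hbj (Option.some.inj hcon)
        have h3 : ¬ ((a[a.length]?.isSome ∧ a[a.length]? = b[j]?) ∨ ((a[a.length]? = some "*" ∧ j < b.length) ∨ (b[j]? = some "*" ∧ a.length < a.length))) := by
          rw [htokA]; simp
        have hs0 : (0 : Int) ≤ s := by rcases hs with rfl | rfl <;> omega
        have h4 : s ≠ -1 ∧ s ≤ (b.length : Int) := by
          constructor
          · omega
          · rcases hs with rfl | rfl <;> omega
        rw [aLoop_btA a b fuel a.length j s (-1) h0 h1 h2 h3 h4]
        have hstn : s.toNat = j ∨ s.toNat = j + 1 := by rcases hs with rfl | rfl <;> omega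
        have hrec := ih s.toNat (s + 1)
          (by right; omega)
          (by rcases hs with rfl | rfl <;> omega)
          (by have : (s+1).toNat = s.toNat + 1 := by omega
              rw [this]; rcases hs with rfl | rfl <;> simp at hfuel ⊢ <;> omega)
        rw [hrec]
        constructor
        · rintro (hnb | hsl)
          · exact Or.inl hnb
          · -- s.toNat = len(b): then j = len(b)-1 with a literal last token, so b is not open
            left
            have hj1 : j + 1 = b.length := by omega
            rw [pvOa_getD b hb0]
            intro hlast
            exact hbj (by rw [← hlast]; congr 1; omega)
        · rintro (hnb | hsl)
          · exact Or.inl hnb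
          · exact absurd hsl hjl

-- the walk after B's '>' has been consumed: j = len(b), star_b_j drives i forward
lemma pvWalkB (a b : List String) (ha : ">" ∉ a.dropLast) :
    ∀ (fuel i : Nat) (s : Int), (s = (i : Int) ∨ s = (i : Int) + 1) → i ≤ a.length →
    2 * a.length + 4 ≤ fuel + i + s.toNat →
    (aLoop a b fuel i b.length (-1) s = true ↔ (¬ pvOa a ∨ i = a.length)) := by
  intro fuel
  induction fuel with
  | zero =>
    intro i s hs hi hfuel
    exfalso
    rcases hs with rfl | rfl <;> simp at hfuel <;> omega
  | succ fuel ih =>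
    intro i s hs hi hfuel
    by_cases hil : i = a.length
    · subst hil
      rw [aLoop_exit a b fuel a.length b.length (-1) s (by omega)]
      simp
    · have hilt : i < a.length := by omega
      have ha0 : a ≠ [] := by intro h; subst h; simp at hilt
      have h0 : i < a.length ∨ b.length < b.length := Or.inl hilt
      have htokA : a[i]? = some (a.getD i "") := by
        rw [List.getD_eq_getElem a "" hilt, List.getElem?_eq_getElem hilt]
      by_cases hai : a.getD i "" = ">"
      · have h1 : a[i]? = some ">" := by rw [htokA, hai]
        rw [aLoop_gtA a b fuel i b.length (-1) s h0 h1,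
          if_pos (Or.inr (le_refl b.length))]
        have hilast : i = a.length - 1 := by
          by_contra hne
          exact pvValid_getD a ha i (by omega) hai
        simp only [Bool.false_eq_true, false_iff]
        push_neg
        refine ⟨?_, hil⟩
        rw [pvOa_getD a ha0, ← hilast]
        exact hai
      · have h1 : a[i]? ≠ some ">" := by
          rw [htokA]; exact fun hcon => hai (Option.some.inj hcon)
        have htokB : b[b.length]? = none := by simp
        have h2 : b[b.length]? ≠ some ">" := by simp [htokB]
        have h3 : ¬ ((a[i]?.isSome ∧ a[i]? = b[b.length]?) ∨ ((a[i]? = some "*" ∧ b.length < b.length) ∨ (b[b.length]? = some "*" ∧ i < a.length))) := by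
          rw [htokA, htokB]; simp
        have h4 : ¬ ((-1 : Int) ≠ -1 ∧ (-1 : Int) ≤ (b.length : Int)) := by simp
        have h5 : s ≠ -1 ∧ s ≤ (a.length : Int) := by
          constructor
          · rcases hs with rfl | rfl <;> omega
          · rcases hs with rfl | rfl <;> omega
        rw [aLoop_btB a b fuel i b.length (-1) s h0 h1 h2 h3 h4 h5]
        have hrec := ih s.toNat (s + 1)
          (by right; rcases hs with rfl | rfl <;> omega)
          (by rcases hs with rfl | rfl <;> omega)
          (by rcases hs with rfl | rfl <;> simp at hfuel ⊢ <;> omega)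
        rw [hrec]
        constructor
        · rintro (hna | hsl)
          · exact Or.inl hna
          · left
            rw [pvOa_getD a ha0]
            intro hlast
            refine hai ?_
            rw [← hlast]
            congr 1
            rcases hs with rfl | rfl <;> omega
        · rintro (hna | hsl)
          · exact Or.inl hna
          · exact absurd hsl hil

-- lock-step phase of A's loop, characterised
lemma pvPhase1 (a b : List String) (hva : ">" ∉ a.dropLast) (hvb : ">" ∉ b.dropLast) :
    ∀ (fuel i : Nat), i ≤ pvN a b → 3 * (a.length + b.length) + 6 ≤ fuel + 3 * i →
    (aLoop a b fuel i i (-1) (-1) = true ↔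
      (pvELen a b ∧ ∀ p, i ≤ p → p < pvN a b → pvCompat (a.getD p "") (b.getD p ""))) := by
  have hNla : pvN a b ≤ a.length - (if a.getLast? = some ">" then 1 else 0) := min_le_left _ _
  have hNlb : pvN a b ≤ b.length - (if b.getLast? = some ">" then 1 else 0) := min_le_right _ _
  have hNla' : pvN a b ≤ a.length := le_trans hNla (Nat.sub_le _ _)
  have hNlb' : pvN a b ≤ b.length := le_trans hNlb (Nat.sub_le _ _)
  intro fuel
  induction fuel with
  | zero =>
    intro i hiN hfuel
    exfalso; omega
  | succ fuel ih =>
    intro i hiN hfuel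
    by_cases hiNlt : i < pvN a b
    · -- lock-step comparison of two in-range, non-'>' tokens
      have hiA : i < a.length := by omega
      have hiB : i < b.length := by omega
      have hta : a.getD i "" ≠ ">" := pvTok_ne a hva i (lt_of_lt_of_le hiNlt hNla)
      have htb : b.getD i "" ≠ ">" := pvTok_ne b hvb i (lt_of_lt_of_le hiNlt hNlb)
      have etokA : a[i]? = some (a.getD i "") := by
        rw [List.getD_eq_getElem a "" hiA, List.getElem?_eq_getElem hiA]
      have etokB : b[i]? = some (b.getD i "") := by
        rw [List.getD_eq_getElem b "" hiB, List.getElem?_eq_getElem hiB]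
      have h0 : i < a.length ∨ i < b.length := Or.inl hiA
      have h1 : a[i]? ≠ some ">" := by
        rw [etokA]; exact fun hcon => hta (Option.some.inj hcon)
      have h2 : b[i]? ≠ some ">" := by
        rw [etokB]; exact fun hcon => htb (Option.some.inj hcon)
      by_cases hcomp : pvCompat (a.getD i "") (b.getD i "")
      · have h3 : (a[i]?.isSome ∧ a[i]? = b[i]?) ∨ ((a[i]? = some "*" ∧ i < b.length) ∨ (b[i]? = some "*" ∧ i < a.length)) := by
          rcases hcomp with heq | hsa | hsb
          · exact Or.inl ⟨by rw [etokA]; rfl, by rw [etokA, etokB, heq]⟩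
          · exact Or.inr (Or.inl ⟨by rw [etokA, hsa], hiB⟩)
          · exact Or.inr (Or.inr ⟨by rw [etokB, hsb], hiA⟩)
        rw [aLoop_match a b fuel i i (-1) (-1) h0 h1 h2 h3]
        rw [ih (i+1) (by omega) (by omega)]
        constructor
        · rintro ⟨he, hall⟩
          refine ⟨he, fun p hp1 hp2 => ?_⟩
          rcases Nat.eq_or_lt_of_le hp1 with rfl | hlt
          · exact hcomp
          · exact hall p hlt hp2
        · rintro ⟨he, hall⟩
          exact ⟨he, fun p hp1 hp2 => hall p (by omega) hp2⟩
      · have h3 : ¬ ((a[i]?.isSome ∧ a[i]? = b[i]?) ∨ ((a[i]? = some "*" ∧ i < b.length) ∨ (b[i]? = some "*" ∧ i < a.length))) := by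
          rw [etokA, etokB]
          rintro (⟨-, heq⟩ | ⟨hsa, -⟩ | ⟨hsb, -⟩)
          · exact hcomp (Or.inl (Option.some.inj heq))
          · exact hcomp (Or.inr (Or.inl (Option.some.inj hsa)))
          · exact hcomp (Or.inr (Or.inr (Option.some.inj hsb)))
        have h4 : ¬ ((-1 : Int) ≠ -1 ∧ (-1 : Int) ≤ (b.length : Int)) := by simp
        have h5 : ¬ ((-1 : Int) ≠ -1 ∧ (-1 : Int) ≤ (a.length : Int)) := by simp
        rw [aLoop_dead a b fuel i i (-1) (-1) h0 h1 h2 h3 h4 h5]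
        simp only [Bool.false_eq_true, false_iff]
        rintro ⟨-, hall⟩
        exact hcomp (hall i le_rfl hiNlt)
    · -- i = pvN a b: the deciding step
      have hieq : i = pvN a b := by omega
      have hRHS : (pvELen a b ∧ ∀ p, i ≤ p → p < pvN a b → pvCompat (a.getD p "") (b.getD p "")) ↔ pvELen a b :=
        ⟨And.left, fun h => ⟨h, fun p hp1 hp2 => absurd hp1 (by omega)⟩⟩
      rw [hRHS]
      by_cases goa : a.getLast? = some ">" <;> by_cases gob : b.getLast? = some ">"
      · -- both patterns open
        have hNval : pvN a b = min (a.length - 1) (b.length - 1) := by simp [pvN, goa, gob]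
        have hEval : pvELen a b ↔ a.length = b.length := by simp [pvELen, goa, gob]
        have ha0 : a ≠ [] := by intro h; subst h; simp at goa
        have hb0 : b ≠ [] := by intro h; subst h; simp at gob
        have hla1 : 1 ≤ a.length := List.length_pos_iff.2 ha0
        have hlb1 : 1 ≤ b.length := List.length_pos_iff.2 hb0
        rw [hEval]
        rcases (Nat.lt_or_ge b.length a.length).symm with hle | hlt
        · -- i = la - 1, tok_a = '>' consumed, then the walk over b
          have hi : i = a.length - 1 := by omega
          have h1 : a[i]? = some ">" := by
            rw [List.getElem?_eq_getElem (by omega), ← List.getD_eq_getElem a "" (by omega)]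
            exact congrArg some (by rw [hi]; exact (pvOa_getD a ha0).1 goa)
          rw [aLoop_gtA a b fuel i i (-1) (-1) (Or.inl (by omega)) h1,
            if_neg (by push_neg; constructor <;> omega)]
          have hstep : i + 1 = a.length := by omega
          have hcast : ((i : Int) + 1) = ((i + 1 : Nat) : Int) := by omega
          rw [hcast, hstep]
          rw [pvWalkA a b hvb fuel a.length ((a.length : Nat) : Int) (Or.inl rfl) hle (by omega)]
          simp only [pvOa, gob, not_true_eq_false, false_or]
        · -- lb - 1 < la - 1: tok_b = '>' is reached with a literal a-token, then the walk over a fails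
          have hi : i = b.length - 1 := by omega
          have hiA : i < a.length := by omega
          have hta : a.getD i "" ≠ ">" := pvValid_getD a hva i (by omega)
          have h1 : a[i]? ≠ some ">" := by
            rw [List.getD_eq_getElem a "" hiA] at hta
            rw [List.getElem?_eq_getElem hiA]
            exact fun hcon => hta (Option.some.inj hcon)
          have h2 : b[i]? = some ">" := by
            rw [List.getElem?_eq_getElem (by omega), ← List.getD_eq_getElem b "" (by omega)]
            exact congrArg some (by rw [hi]; exact (pvOa_getD b hb0).1 gob)
          rw [aLoop_gtB a b fuel i i (-1) (-1) (Or.inl hiA) h1 h2,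
            if_neg (by push_neg; constructor <;> omega)]
          have hstep : i + 1 = b.length := by omega
          have hcast : ((i : Int) + 1) = ((i + 1 : Nat) : Int) := by omega
          rw [hcast, hstep]
          rw [pvWalkB a b hva fuel b.length ((b.length : Nat) : Int) (Or.inl rfl) (by omega) (by omega)]
          simp only [pvOa, goa, not_true_eq_false, false_or]
          constructor <;> omega
      · -- a open, b fixed
        have hNval : pvN a b = min (a.length - 1) b.length := by simp [pvN, goa, gob]
        have hEval : pvELen a b ↔ a.length ≤ b.length := by simp [pvELen, goa, gob]
        have ha0 : a ≠ [] := by intro h; subst h; simp at goa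
        have hla1 : 1 ≤ a.length := List.length_pos_iff.2 ha0
        rw [hEval]
        rcases (Nat.lt_or_ge b.length (a.length - 1)).symm with hle | hlt
        · have hi : i = a.length - 1 := by omega
          have h1 : a[i]? = some ">" := by
            rw [List.getElem?_eq_getElem (by omega), ← List.getD_eq_getElem a "" (by omega)]
            exact congrArg some (by rw [hi]; exact (pvOa_getD a ha0).1 goa)
          rcases Nat.eq_or_lt_of_le hle with heq | hlt2
          · -- j = la - 1 = lb: '>' cannot eat a token, A returns False
            rw [aLoop_gtA a b fuel i i (-1) (-1) (Or.inl (by omega)) h1,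
              if_pos (Or.inr (by omega))]
            simp only [Bool.false_eq_true, false_iff]
            omega
          · rw [aLoop_gtA a b fuel i i (-1) (-1) (Or.inl (by omega)) h1,
              if_neg (by push_neg; constructor <;> omega)]
            have hstep : i + 1 = a.length := by omega
            have hcast : ((i : Int) + 1) = ((i + 1 : Nat) : Int) := by omega
            rw [hcast, hstep]
            rw [pvWalkA a b hvb fuel a.length ((a.length : Nat) : Int) (Or.inl rfl) (by omega) (by omega)]
            simp only [pvOa, gob, not_false_eq_true, true_or, true_iff]
            omega
        · -- b ends before a's '>': dead end
          have hi : i = b.length := by omega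
          have hiA : i < a.length := by omega
          have hta : a.getD i "" ≠ ">" := pvValid_getD a hva i (by omega)
          have etokA : a[i]? = some (a.getD i "") := by
            rw [List.getD_eq_getElem a "" hiA, List.getElem?_eq_getElem hiA]
          have htokB : b[i]? = none := by rw [List.getElem?_eq_none]; omega
          have h1 : a[i]? ≠ some ">" := by
            rw [etokA]; exact fun hcon => hta (Option.some.inj hcon)
          have h2 : b[i]? ≠ some ">" := by simp [htokB]
          have h3 : ¬ ((a[i]?.isSome ∧ a[i]? = b[i]?) ∨ ((a[i]? = some "*" ∧ i < b.length) ∨ (b[i]? = some "*" ∧ i < a.length))) := by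
            rw [etokA, htokB]
            rintro (⟨-, heq⟩ | ⟨-, hlt'⟩ | ⟨hsb, -⟩)
            · simp at heq
            · omega
            · simp at hsb
          rw [aLoop_dead a b fuel i i (-1) (-1) (Or.inl hiA) h1 h2 h3 (by simp) (by simp)]
          simp only [Bool.false_eq_true, false_iff]
          omega
      · -- a fixed, b open
        have hNval : pvN a b = min a.length (b.length - 1) := by simp [pvN, goa, gob]
        have hEval : pvELen a b ↔ b.length ≤ a.length := by simp [pvELen, goa, gob]
        have hb0 : b ≠ [] := by intro h; subst h; simp at gob
        have hlb1 : 1 ≤ b.length := List.length_pos_iff.2 hb0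
        rw [hEval]
        rcases (Nat.lt_or_ge a.length (b.length - 1)).symm with hle | hlt
        · have hi : i = b.length - 1 := by omega
          have h2 : b[i]? = some ">" := by
            rw [List.getElem?_eq_getElem (by omega), ← List.getD_eq_getElem b "" (by omega)]
            exact congrArg some (by rw [hi]; exact (pvOa_getD b hb0).1 gob)
          rcases Nat.eq_or_lt_of_le hle with heq | hlt2
          · -- i = lb - 1 = la: tok_a is None, b's '>' cannot eat a token
            have htokA : a[i]? = none := by rw [List.getElem?_eq_none]; omega
            have h1 : a[i]? ≠ some ">" := by simp [htokA]
            rw [aLoop_gtB a b fuel i i (-1) (-1) (Or.inr (by omega)) h1 h2,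
              if_pos (Or.inr (by omega))]
            simp only [Bool.false_eq_true, false_iff]
            omega
          · have hiA : i < a.length := by omega
            have hta : a.getD i "" ≠ ">" := pvTok_ne a hva i (by rw [if_neg goa]; omega)
            have h1 : a[i]? ≠ some ">" := by
              rw [List.getD_eq_getElem a "" hiA] at hta
              rw [List.getElem?_eq_getElem hiA]
              exact fun hcon => hta (Option.some.inj hcon)
            rw [aLoop_gtB a b fuel i i (-1) (-1) (Or.inl hiA) h1 h2,
              if_neg (by push_neg; constructor <;> omega)]
            have hstep : i + 1 = b.length := by omega
            have hcast : ((i : Int) + 1) = ((i + 1 : Nat) : Int) := by omega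
            rw [hcast, hstep]
            rw [pvWalkB a b hva fuel b.length ((b.length : Nat) : Int) (Or.inl rfl) (by omega) (by omega)]
            simp only [pvOa, goa, not_false_eq_true, true_or, true_iff]
            omega
        · -- a ends before b's '>': dead end
          have hi : i = a.length := by omega
          have hiB : i < b.length := by omega
          have htb : b.getD i "" ≠ ">" := pvValid_getD b hvb i (by omega)
          have etokB : b[i]? = some (b.getD i "") := by
            rw [List.getD_eq_getElem b "" hiB, List.getElem?_eq_getElem hiB]
          have htokA : a[i]? = none := by rw [List.getElem?_eq_none]; omega
          have h1 : a[i]? ≠ some ">" := by simp [htokA]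
          have h2 : b[i]? ≠ some ">" := by
            rw [etokB]; exact fun hcon => htb (Option.some.inj hcon)
          have h3 : ¬ ((a[i]?.isSome ∧ a[i]? = b[i]?) ∨ ((a[i]? = some "*" ∧ i < b.length) ∨ (b[i]? = some "*" ∧ i < a.length))) := by
            rw [etokB, htokA]
            rintro (⟨hsome, -⟩ | ⟨hsa, -⟩ | ⟨-, hlt'⟩)
            · simp at hsome
            · simp at hsa
            · omega
          rw [aLoop_dead a b fuel i i (-1) (-1) (Or.inr hiB) h1 h2 h3 (by simp) (by simp)]
          simp only [Bool.false_eq_true, false_iff]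
          omega
      · -- both fixed
        have hNval : pvN a b = min a.length b.length := by simp [pvN, goa, gob]
        have hEval : pvELen a b ↔ a.length = b.length := by simp [pvELen, goa, gob]
        rw [hEval]
        rcases Nat.lt_trichotomy a.length b.length with hlt | heq | hlt
        · -- i = la < lb: tok_a is None, dead end
          have hi : i = a.length := by omega
          have hiB : i < b.length := by omega
          have htb : b.getD i "" ≠ ">" := pvTok_ne b hvb i (by rw [if_neg gob]; omega)
          have etokB : b[i]? = some (b.getD i "") := by
            rw [List.getD_eq_getElem b "" hiB, List.getElem?_eq_getElem hiB]
          have htokA : a[i]? = none := by rw [List.getElem?_eq_none]; omega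
          have h1 : a[i]? ≠ some ">" := by simp [htokA]
          have h2 : b[i]? ≠ some ">" := by
            rw [etokB]; exact fun hcon => htb (Option.some.inj hcon)
          have h3 : ¬ ((a[i]?.isSome ∧ a[i]? = b[i]?) ∨ ((a[i]? = some "*" ∧ i < b.length) ∨ (b[i]? = some "*" ∧ i < a.length))) := by
            rw [etokB, htokA]
            rintro (⟨hsome, -⟩ | ⟨hsa, -⟩ | ⟨-, hlt'⟩)
            · simp at hsome
            · simp at hsa
            · omega
          rw [aLoop_dead a b fuel i i (-1) (-1) (Or.inr hiB) h1 h2 h3 (by simp) (by simp)]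
          simp only [Bool.false_eq_true, false_iff]
          omega
        · -- i = la = lb: loop exits, True
          rw [aLoop_exit a b fuel i i (-1) (-1) (by omega)]
          simp [heq]
        · -- i = lb < la: tok_b is None, dead end
          have hi : i = b.length := by omega
          have hiA : i < a.length := by omega
          have hta : a.getD i "" ≠ ">" := pvTok_ne a hva i (by rw [if_neg goa]; omega)
          have etokA : a[i]? = some (a.getD i "") := by
            rw [List.getD_eq_getElem a "" hiA, List.getElem?_eq_getElem hiA]
          have htokB : b[i]? = none := by rw [List.getElem?_eq_none]; omega
          have h1 : a[i]? ≠ some ">" := by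
            rw [etokA]; exact fun hcon => hta (Option.some.inj hcon)
          have h2 : b[i]? ≠ some ">" := by simp [htokB]
          have h3 : ¬ ((a[i]?.isSome ∧ a[i]? = b[i]?) ∨ ((a[i]? = some "*" ∧ i < b.length) ∨ (b[i]? = some "*" ∧ i < a.length))) := by
            rw [etokA, htokB]
            rintro (⟨-, heq'⟩ | ⟨-, hlt'⟩ | ⟨hsb, -⟩)
            · simp at heq'
            · omega
            · simp at hsb
          rw [aLoop_dead a b fuel i i (-1) (-1) (Or.inl hiA) h1 h2 h3 (by simp) (by simp)]
          simp only [Bool.false_eq_true, false_iff]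
          omega

lemma pvZipForall (xs ys : List String) (P : String → String → Prop) :
    (∀ q ∈ xs.zip ys, P q.1 q.2) ↔
    (∀ p, p < min xs.length ys.length → P (xs.getD p "") (ys.getD p "")) := by
  constructor
  · intro h p hp
    have hx : p < xs.length := by omega
    have hy : p < ys.length := by omega
    have hmem : (xs.zip ys)[p]'(by simp [List.length_zip]; omega) ∈ xs.zip ys := List.getElem_mem _
    have := h _ hmem
    rw [List.getElem_zip] at this
    rwa [List.getD_eq_getElem xs "" hx, List.getD_eq_getElem ys "" hy]
  · intro h q hq
    obtain ⟨k, hk, hkq⟩ := List.mem_iff_getElem.1 hq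
    have hk' : k < min xs.length ys.length := by simpa [List.length_zip] using hk
    have hx : k < xs.length := by omega
    have hy : k < ys.length := by omega
    have := h k hk'
    rw [List.getD_eq_getElem xs "" hx, List.getD_eq_getElem ys "" hy] at this
    rw [← hkq, List.getElem_zip]
    exact this

-- characterisation of A's port on valid patterns
lemma pvA_iff (a b : List String) (hva : ">" ∉ a.dropLast) (hvb : ">" ∉ b.dropLast) :
    (aLoop a b (3 * (a.length + b.length) + 6) 0 0 (-1) (-1) = true ↔
      (pvELen a b ∧ ∀ p, p < pvN a b → pvCompat (a.getD p "") (b.getD p ""))) := by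
  rw [pvPhase1 a b hva hvb (3 * (a.length + b.length) + 6) 0 (Nat.zero_le _) (by omega)]
  constructor
  · rintro ⟨he, hall⟩; exact ⟨he, fun p hp => hall p (Nat.zero_le _) hp⟩
  · rintro ⟨he, hall⟩; exact ⟨he, fun p _ hp => hall p hp⟩

-- getD of the core agrees with getD of the full token list
lemma pvGetD_dropLast (a : List String) (p : Nat) (hp : p < a.length - 1) :
    a.dropLast.getD p "" = a.getD p "" := by
  have hp' : p < a.dropLast.length := by simp [List.length_dropLast]; omega
  rw [List.getD_eq_getElem _ _ hp', List.getD_eq_getElem a "" (by omega), List.getElem_dropLast]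

lemma pvZipAll (xs ys : List String) :
    (((xs.zip ys).all (fun p => p.1 == p.2 || p.1 == "*" || p.2 == "*")) = true) ↔
    (∀ p, p < min xs.length ys.length → pvCompat (xs.getD p "") (ys.getD p "")) := by
  rw [List.all_eq_true]
  constructor
  · intro h
    refine (pvZipForall xs ys pvCompat).1 (fun q hq => ?_)
    have := h q hq
    simpa [pvCompat, or_assoc] using this
  · intro h q hq
    have := (pvZipForall xs ys pvCompat).2 h q hq
    simpa [pvCompat, or_assoc] using this

-- characterisation of B's port on valid patterns
lemma pvB_iff (a b : List String) (hva : ">" ∉ a.dropLast) (hvb : ">" ∉ b.dropLast) :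
    ((if a.dropLast.contains ">" || b.dropLast.contains ">" then false
      else
        let oa := a.getLast? == some ">"
        let ob := b.getLast? == some ">"
        let ca := if oa then a.dropLast else a
        let cb := if ob then b.dropLast else b
        let ok := if oa then (if ob then true else decide (cb.length ≥ ca.length + 1))
                  else if ob then decide (ca.length ≥ cb.length + 1)
                  else decide (ca.length = cb.length)
        ok && (ca.zip cb).all (fun p => p.1 == p.2 || p.1 == "*" || p.2 == "*")) = true ↔
      (((pvOa a ∧ pvOa b) ∨ pvELen a b) ∧ ∀ p, p < pvN a b → pvCompat (a.getD p "") (b.getD p ""))) := by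
  have hca : a.dropLast.contains ">" = false := by simp [hva]
  have hcb : b.dropLast.contains ">" = false := by simp [hvb]
  rw [if_neg (by rw [hca, hcb]; simp)]
  by_cases goa : a.getLast? = some ">" <;> by_cases gob : b.getLast? = some ">"
  · -- both open
    have e1 : (a.getLast? == some ">") = true := by simp [goa]
    have e2 : (b.getLast? == some ">") = true := by simp [gob]
    have ha0 : a ≠ [] := by intro h; subst h; simp at goa
    have hb0 : b ≠ [] := by intro h; subst h; simp at gob
    simp only [e1, e2, if_true]
    rw [Bool.true_and, pvZipAll]
    have hN : pvN a b = min a.dropLast.length b.dropLast.length := by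
      simp [pvN, goa, gob, List.length_dropLast]
    constructor
    · intro h
      refine ⟨Or.inl ⟨goa, gob⟩, fun p hp => ?_⟩
      rw [hN] at hp
      have h1 := h p hp
      rwa [pvGetD_dropLast a p (by simp [List.length_dropLast] at hp; omega),
        pvGetD_dropLast b p (by simp [List.length_dropLast] at hp; omega)] at h1
    · rintro ⟨-, h⟩ p hp
      have hp' : p < pvN a b := by rw [hN]; exact hp
      rw [pvGetD_dropLast a p (by rw [hN] at hp'; simp [List.length_dropLast] at hp'; omega),
        pvGetD_dropLast b p (by rw [hN] at hp'; simp [List.length_dropLast] at hp'; omega)]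
      exact h p hp'
  · -- a open, b fixed
    have e1 : (a.getLast? == some ">") = true := by simp [goa]
    have e2 : (b.getLast? == some ">") = false := by simp [gob]
    have ha0 : a ≠ [] := by intro h; subst h; simp at goa
    have hla1 : 1 ≤ a.length := List.length_pos_iff.2 ha0
    simp only [e1, e2, if_true, Bool.false_eq_true, if_false]
    rw [Bool.and_eq_true, decide_eq_true_eq, pvZipAll]
    have hE : pvELen a b ↔ a.length ≤ b.length := by simp [pvELen, goa, gob]
    have hN : pvN a b = min a.dropLast.length b.length := by
      simp [pvN, goa, gob, List.length_dropLast]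
    constructor
    · rintro ⟨hlen, h⟩
      refine ⟨Or.inr (hE.2 (by simp [List.length_dropLast] at hlen; omega)), fun p hp => ?_⟩
      rw [hN] at hp
      have h1 := h p hp
      rwa [pvGetD_dropLast a p (by simp [List.length_dropLast] at hp; omega)] at h1
    · rintro ⟨hdisj, h⟩
      have hle : a.length ≤ b.length := by
        rcases hdisj with ⟨-, hob⟩ | hE'
        · exact absurd hob gob
        · exact hE.1 hE'
      refine ⟨by simp [List.length_dropLast]; omega, fun p hp => ?_⟩
      have hp' : p < pvN a b := by rw [hN]; exact hp
      rw [pvGetD_dropLast a p (by rw [hN] at hp'; simp [List.length_dropLast] at hp'; omega)]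
      exact h p hp'
  · -- a fixed, b open
    have e1 : (a.getLast? == some ">") = false := by simp [goa]
    have e2 : (b.getLast? == some ">") = true := by simp [gob]
    have hb0 : b ≠ [] := by intro h; subst h; simp at gob
    have hlb1 : 1 ≤ b.length := List.length_pos_iff.2 hb0
    simp only [e1, e2, if_true, Bool.false_eq_true, if_false]
    rw [Bool.and_eq_true, decide_eq_true_eq, pvZipAll]
    have hE : pvELen a b ↔ b.length ≤ a.length := by simp [pvELen, goa, gob]
    have hN : pvN a b = min a.length b.dropLast.length := by
      simp [pvN, goa, gob, List.length_dropLast]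
    constructor
    · rintro ⟨hlen, h⟩
      refine ⟨Or.inr (hE.2 (by simp [List.length_dropLast] at hlen; omega)), fun p hp => ?_⟩
      rw [hN] at hp
      have h1 := h p hp
      rwa [pvGetD_dropLast b p (by simp [List.length_dropLast] at hp; omega)] at h1
    · rintro ⟨hdisj, h⟩
      have hle : b.length ≤ a.length := by
        rcases hdisj with ⟨hoa, -⟩ | hE'
        · exact absurd hoa goa
        · exact hE.1 hE'
      refine ⟨by simp [List.length_dropLast]; omega, fun p hp => ?_⟩
      have hp' : p < pvN a b := by rw [hN]; exact hp
      rw [pvGetD_dropLast b p (by rw [hN] at hp'; simp [List.length_dropLast] at hp'; omega)]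
      exact h p hp'
  · -- both fixed
    have e1 : (a.getLast? == some ">") = false := by simp [goa]
    have e2 : (b.getLast? == some ">") = false := by simp [gob]
    simp only [e1, e2, Bool.false_eq_true, if_false]
    rw [Bool.and_eq_true, decide_eq_true_eq, pvZipAll]
    have hE : pvELen a b ↔ a.length = b.length := by simp [pvELen, goa, gob]
    have hN : pvN a b = min a.length b.length := by simp [pvN, goa, gob]
    constructor
    · rintro ⟨hlen, h⟩
      exact ⟨Or.inr (hE.2 hlen), fun p hp => h p (by rw [← hN]; exact hp)⟩
    · rintro ⟨hdisj, h⟩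
      have hlen : a.length = b.length := by
        rcases hdisj with ⟨hoa, -⟩ | hE'
        · exact absurd hoa goa
        · exact hE.1 hE'
      exact ⟨hlen, fun p hp => h p (by rw [hN]; exact hp)⟩

-- ===== VERDICT =====
lemma pvBoolExt (x y : Bool) (h : x = true ↔ y = true) : x = y := by
  cases x <;> cases y <;> simp_all

theorem topic_pattern_matcher_py_spec : Claim_unchanged_topic_pattern_matcher_py := by
  unfold Claim_unchanged_topic_pattern_matcher_py
  intro pa pb hdom hpre
  unfold Spec_topic_pattern_matcher_py
  intro hnD
  unfold Pre_topic_pattern_matcher_py at hpre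
  unfold D_topic_pattern_matcher_py at hnD
  obtain ⟨hva, hvb⟩ := hpre
  set a := pvTokens pa with hA
  set b := pvTokens pb with hB
  apply pvBoolExt
  rw [show topic_pattern_matcher_py pa pb
      = aLoop a b (3 * (a.length + b.length) + 6) 0 0 (-1) (-1) from rfl]
  rw [show topic_pattern_matcher_py_alt pa pb
      = (if a.dropLast.contains ">" || b.dropLast.contains ">" then false
         else
           let oa := a.getLast? == some ">"
           let ob := b.getLast? == some ">"
           let ca := if oa then a.dropLast else a
           let cb := if ob then b.dropLast else b
           let ok := if oa then (if ob then true else decide (cb.length ≥ ca.length + 1))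
                     else if ob then decide (ca.length ≥ cb.length + 1)
                     else decide (ca.length = cb.length)
           ok && (ca.zip cb).all (fun p => p.1 == p.2 || p.1 == "*" || p.2 == "*")) from rfl]
  rw [pvA_iff a b hva hvb, pvB_iff a b hva hvb]
  constructor
  · rintro ⟨he, hc⟩; exact ⟨Or.inr he, hc⟩
  · rintro ⟨hd, hc⟩
    refine ⟨?_, hc⟩
    rcases hd with ⟨goa, gob⟩ | he
    · have goa' : a.getLast? = some ">" := goa
      have gob' : b.getLast? = some ">" := gob
      have hE : pvELen a b ↔ a.length = b.length := by simp [pvELen, goa', gob']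
      rw [hE]
      by_contra hne
      apply hnD
      refine ⟨goa, gob, hne, ?_⟩
      refine (pvZipForall a.dropLast b.dropLast (fun x y => x = y ∨ x = "*" ∨ y = "*")).2 ?_
      intro p hp
      have hp' : p < pvN a b := by
        simp [pvN, goa', gob', List.length_dropLast] at hp ⊢
        omega
      have := hc p hp'
      rw [← pvGetD_dropLast a p (by simp [List.length_dropLast] at hp; omega),
        ← pvGetD_dropLast b p (by simp [List.length_dropLast] at hp; omega)] at this
      exact this
    · exact he

theorem topic_pattern_matcher_py_changed : Claim_changed_topic_pattern_matcher_py := by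
  unfold Claim_changed_topic_pattern_matcher_py; decide

theorem topic_pattern_matcher_py_tight : Claim_exact_topic_pattern_matcher_py := by
  unfold Claim_exact_topic_pattern_matcher_py
  intro pa pb hdom hpre hD
  unfold Pre_topic_pattern_matcher_py at hpre
  unfold D_topic_pattern_matcher_py at hD
  obtain ⟨hva, hvb⟩ := hpre
  set a := pvTokens pa with hA
  set b := pvTokens pb with hB
  obtain ⟨goa, gob, hlen, hzip⟩ := hD
  have hAfalse : topic_pattern_matcher_py pa pb = false := by
    rw [show topic_pattern_matcher_py pa pb
        = aLoop a b (3 * (a.length + b.length) + 6) 0 0 (-1) (-1) from rfl]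
    rw [Bool.eq_false_iff]
    rw [Ne, pvA_iff a b hva hvb]
    rintro ⟨hE, -⟩
    exact hlen (by simpa [pvELen, goa, gob] using hE)
  have hBtrue : topic_pattern_matcher_py_alt pa pb = true := by
    rw [show topic_pattern_matcher_py_alt pa pb
        = (if a.dropLast.contains ">" || b.dropLast.contains ">" then false
           else
             let oa := a.getLast? == some ">"
             let ob := b.getLast? == some ">"
             let ca := if oa then a.dropLast else a
             let cb := if ob then b.dropLast else b
             let ok := if oa then (if ob then true else decide (cb.length ≥ ca.length + 1))
                       else if ob then decide (ca.length ≥ cb.length + 1)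
                       else decide (ca.length = cb.length)
             ok && (ca.zip cb).all (fun p => p.1 == p.2 || p.1 == "*" || p.2 == "*")) from rfl]
    rw [pvB_iff a b hva hvb]
    refine ⟨Or.inl ⟨goa, gob⟩, fun p hp => ?_⟩
    have hpN : p < min a.dropLast.length b.dropLast.length := by
      simp [pvN, goa, gob, List.length_dropLast] at hp ⊢
      omega
    have := (pvZipForall a.dropLast b.dropLast (fun x y => x = y ∨ x = "*" ∨ y = "*")).1 hzip p hpN
    rw [pvGetD_dropLast a p (by simp [List.length_dropLast] at hpN; omega),
      pvGetD_dropLast b p (by simp [List.length_dropLast] at hpN; omega)] at this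
    exact this
  rw [hAfalse, hBtrue]
  simp
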